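-- pv_equiv track=rewrite | github.com/mandistep2026/PureOS | shell/shell.py | _parse_field_spec
-- ===== SOURCE A (Python) =====
-- from typing import List, Dict, Callable, Optional, Tuple, Any
--
-- def _parse_field_spec(spec: str) -> Optional[List[int]]:
--     fields = set()
--     for chunk in spec.split(','):
--         part = chunk.strip()
--         if not part:
--             return None
--
--         if '-' in part:
--             start_text, end_text = part.split('-', 1)
--             if not start_text.isdigit() or not end_text.isdigit():
--                 return None
--             start = int(start_text)
--             end = int(end_text)
--             if start <= 0 or end <= 0 or start > end:
--                 return None
--             for idx in range(start, end + 1):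
--                 fields.add(idx)
--         else:
--             if not part.isdigit():
--                 return None
--             value = int(part)
--             if value <= 0:
--                 return None
--             fields.add(value)
--
--     return sorted(fields)
-- ===== SOURCE B (Python) =====
-- def _chunk_interval(part):
--     if not part:
--         return None
--     if '-' in part:
--         start_text, end_text = part.split('-', 1)
--     else:
--         start_text = end_text = part
--     if not start_text.isdigit() or not end_text.isdigit():
--         return None
--     start = int(start_text)
--     end = int(end_text)
--     if start <= 0 or end <= 0 or start > end:
--         return None
--     return (start, end)
--
--
-- def _parse_field_spec(spec):
--     intervals = []
--     for chunk in spec.split(','):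
--         iv = _chunk_interval(chunk.strip())
--         if iv is None:
--             return None
--         intervals.append(iv)
--     intervals.sort(key=lambda iv: iv[0])
--     result = []
--     if intervals:
--         cur_s, cur_e = intervals[0]
--         for s, e in intervals[1:]:
--             if s <= cur_e + 1:
--                 if e > cur_e:
--                     cur_e = e
--             else:
--                 result.extend(range(cur_s, cur_e + 1))
--                 cur_s, cur_e = s, e
--         result.extend(range(cur_s, cur_e + 1))
--     return result
-- ===== Notes on version B (the rewrite author's own statement) =====
-- stated objective: faster
-- what changed: B validates each chunk into a (start,end) interval via a helper, then sorts the intervals, merges overlapping/adjacent ones in one linear pass and enumerates the merged runs, instead of A's inserting every covered index into a set and sorting the whole set.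
import Mathlib
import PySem

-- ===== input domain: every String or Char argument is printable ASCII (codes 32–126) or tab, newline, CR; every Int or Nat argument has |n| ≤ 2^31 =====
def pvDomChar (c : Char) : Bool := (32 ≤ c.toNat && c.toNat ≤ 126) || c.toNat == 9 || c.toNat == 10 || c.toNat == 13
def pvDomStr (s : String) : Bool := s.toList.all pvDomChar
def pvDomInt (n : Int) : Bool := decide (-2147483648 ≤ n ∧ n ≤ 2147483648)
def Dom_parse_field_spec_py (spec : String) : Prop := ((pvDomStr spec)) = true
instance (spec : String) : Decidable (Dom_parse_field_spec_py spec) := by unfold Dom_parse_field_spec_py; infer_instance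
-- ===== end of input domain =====

-- B replaces A's per-index set accumulation + final sort by validated intervals that are
-- sorted and merged, then enumerated — faster when ranges are wide or overlap.

-- ===== PORT A =====
-- the loop 'for chunk in spec.split(int ','): …' accumulating the set 'fields'
def pvA_loop : List String → PySem.Set Int → Option (PySem.Set Int)
  | [], fields => some fields
  | chunk :: rest, fields =>
      let part := PySem.Str.strip chunk
      if part = "" then none
      else if PySem.Str.isIn "-" part then
        match (PySem.Str.splitMax? part "-" 1).getD [] with
        | [startText, endText] =>
            if !PySem.Str.strIsdigit startText || !PySem.Str.strIsdigit endText then none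
            else
              -- isdigit holds, so int() cannot raise: getD 0 is exact here
              let start := (PySem.Int.ofStr? startText).getD 0
              let e := (PySem.Int.ofStr? endText).getD 0
              if start ≤ 0 || e ≤ 0 || decide (start > e) then none
              else pvA_loop rest ((PySem.List.pyRange start (e + 1) 1).foldl PySem.Set.add fields)
        | _ => none  -- unreachable: split('-', 1) with '-' in part yields exactly two pieces
      else
        if !PySem.Str.strIsdigit part then none
        else
          let value := (PySem.Int.ofStr? part).getD 0
          if value ≤ 0 then none
          else pvA_loop rest (PySem.Set.add fields value)

def parse_field_spec_py (spec : String) : Option (List Int) :=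
  match pvA_loop ((PySem.Str.split? spec ",").getD []) PySem.Set.empty with
  | none => none
  | some fields => some (PySem.List.sorted fields (fun x => x) false)

-- ===== PORT B =====
-- _chunk_interval: validate one stripped chunk, return its (start, end) interval
def pvB_chunkInterval (part : String) : Option (Int × Int) :=
  if part = "" then none
  else
    match (if PySem.Str.isIn "-" part then (PySem.Str.splitMax? part "-" 1).getD []
           else [part, part]) with  -- no '-': start_text = end_text = part
    | [startText, endText] =>
        if !PySem.Str.strIsdigit startText || !PySem.Str.strIsdigit endText then none
        else
          -- isdigit holds, so int() cannot raise: getD 0 is exact here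
          let start := (PySem.Int.ofStr? startText).getD 0
          let e := (PySem.Int.ofStr? endText).getD 0
          if start ≤ 0 || e ≤ 0 || decide (start > e) then none
          else some (start, e)
    | _ => none  -- unreachable: split('-', 1) with '-' in part yields exactly two pieces

-- the collection loop 'for chunk in spec.split(','): …' appending intervals
def pvB_collect : List String → List (Int × Int) → Option (List (Int × Int))
  | [], acc => some acc
  | chunk :: rest, acc =>
      match pvB_chunkInterval (PySem.Str.strip chunk) with
      | none => none
      | some iv => pvB_collect rest (acc ++ [iv])

-- the merge loop over the sorted intervals, flushing each finished run into 'result'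
def pvB_merge : List (Int × Int) → Int → Int → List Int → List Int
  | [], curS, curE, result => result ++ PySem.List.pyRange curS (curE + 1) 1
  | (s, e) :: rest, curS, curE, result =>
      if s ≤ curE + 1 then
        pvB_merge rest curS (if e > curE then e else curE) result
      else
        pvB_merge rest s e (result ++ PySem.List.pyRange curS (curE + 1) 1)

def parse_field_spec_py_alt (spec : String) : Option (List Int) :=
  match pvB_collect ((PySem.Str.split? spec ",").getD []) [] with
  | none => none
  | some intervals =>
      match PySem.List.sorted intervals (fun iv => iv.1) false with
      | [] => some []
      | (s0, e0) :: rest => some (pvB_merge rest s0 e0 [])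

-- ===== PRECONDITION & SPEC =====
def Spec_parse_field_spec_py (spec : String) (out : Option (List Int)) : Prop := out = parse_field_spec_py_alt spec
instance (spec : String) (out : Option (List Int)) : Decidable (Spec_parse_field_spec_py spec out) := by unfold Spec_parse_field_spec_py; infer_instance

-- ===== CLAIM (what is proved, stated in full; the proofs are below) =====
def Claim_equal_parse_field_spec_py : Prop := ∀ (spec : String), Dom_parse_field_spec_py spec → Spec_parse_field_spec_py spec (parse_field_spec_py spec)

-- ===== LEMMAS AND PROOFS =====

-- x is covered by one of the intervals
def pvCover (ivs : List (Int × Int)) (x : Int) : Prop := ∃ p ∈ ivs, p.1 ≤ x ∧ x ≤ p.2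

lemma pvCover_congr {l l' : List (Int × Int)} (h : ∀ p, p ∈ l ↔ p ∈ l') (x : Int) :
    pvCover l x ↔ pvCover l' x := by
  unfold pvCover
  constructor <;> rintro ⟨p, hp, hx⟩
  · exact ⟨p, (h p).mp hp, hx⟩
  · exact ⟨p, (h p).mpr hp, hx⟩

lemma pvCover_cons (s e x : Int) (rest : List (Int × Int)) :
    pvCover ((s, e) :: rest) x ↔ (s ≤ x ∧ x ≤ e) ∨ pvCover rest x := by
  simp [pvCover]

lemma pvCover_append_singleton (acc : List (Int × Int)) (s e x : Int) :
    pvCover (acc ++ [(s, e)]) x ↔ pvCover acc x ∨ (s ≤ x ∧ x ≤ e) := by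
  unfold pvCover
  constructor
  · rintro ⟨p, hp, hx⟩
    rcases List.mem_append.mp hp with h | h
    · exact .inl ⟨p, h, hx⟩
    · rw [List.mem_singleton] at h; subst h; exact .inr hx
  · rintro (⟨p, hp, hx⟩ | hx)
    · exact ⟨p, List.mem_append.mpr (.inl hp), hx⟩
    · exact ⟨(s, e), List.mem_append.mpr (.inr (List.mem_singleton.mpr rfl)), hx⟩

lemma pvMerge_spec : ∀ (ivs : List (Int × Int)) (cs ce : Int) (acc : List Int),
    (∀ p ∈ ivs, cs ≤ p.1 ∧ p.1 ≤ p.2) →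
    ivs.Pairwise (fun a b => a.1 ≤ b.1) →
    cs ≤ ce →
    acc.Pairwise (· < ·) →
    (∀ a ∈ acc, a < cs) →
    (pvB_merge ivs cs ce acc).Pairwise (· < ·) ∧
      (∀ x, x ∈ pvB_merge ivs cs ce acc ↔ x ∈ acc ∨ (cs ≤ x ∧ x ≤ ce) ∨ pvCover ivs x) := by
  intro ivs
  induction ivs with
  | nil =>
    intro cs ce acc _ _ hle hacc hlt
    rw [pvB_merge]
    constructor
    · rw [List.pairwise_append]
      refine ⟨hacc, PySem.List.pairwise_lt_pyRange_one _ _, ?_⟩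
      intro a ha b hb
      have h1 := hlt a ha
      have h2 := PySem.List.mem_pyRange_one.mp hb
      omega
    · intro x
      simp only [List.mem_append, PySem.List.mem_pyRange_one, pvCover, List.not_mem_nil]
      by_cases hX : x ∈ acc <;> simp [hX]
  | cons p rest ih =>
    obtain ⟨s, e⟩ := p
    intro cs ce acc hv hpw hle hacc hlt
    rcases List.pairwise_cons.mp hpw with ⟨hhead, hpw'⟩
    have hsv := hv (s, e) (List.mem_cons_self ..)
    rw [pvB_merge]
    by_cases hcase : s ≤ ce + 1
    · rw [if_pos hcase]
      obtain ⟨h1, h2⟩ := ih cs (if e > ce then e else ce) acc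
        (fun p hp => ⟨(hv p (List.mem_cons_of_mem _ hp)).1, (hv p (List.mem_cons_of_mem _ hp)).2⟩)
        hpw' (by split <;> omega) hacc hlt
      refine ⟨h1, fun x => ?_⟩
      rw [h2 x, pvCover_cons]
      by_cases hX : x ∈ acc <;> by_cases hC : pvCover rest x <;>
        simp [hX, hC] <;> split <;> omega
    · rw [if_neg hcase]
      obtain ⟨h1, h2⟩ := ih s e (acc ++ PySem.List.pyRange cs (ce + 1) 1)
        (fun p hp => ⟨hhead p hp, (hv p (List.mem_cons_of_mem _ hp)).2⟩)
        hpw' hsv.2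
        (by
          rw [List.pairwise_append]
          refine ⟨hacc, PySem.List.pairwise_lt_pyRange_one _ _, ?_⟩
          intro a ha b hb
          have h1 := hlt a ha
          have h2 := PySem.List.mem_pyRange_one.mp hb
          omega)
        (by
          intro a ha
          rcases List.mem_append.mp ha with h | h
          · have := hlt a h; omega
          · have := PySem.List.mem_pyRange_one.mp h; omega)
      refine ⟨h1, fun x => ?_⟩
      rw [h2 x, pvCover_cons]
      simp only [List.mem_append, PySem.List.mem_pyRange_one]
      by_cases hX : x ∈ acc <;> by_cases hC : pvCover rest x <;> simp [hX, hC]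

lemma pvParse_rel : ∀ (chunks : List String) (st : PySem.Set Int) (acc : List (Int × Int)),
    st.Nodup → (∀ x, x ∈ st ↔ pvCover acc x) → (∀ p ∈ acc, p.1 ≤ p.2) →
    (pvA_loop chunks st = none ∧ pvB_collect chunks acc = none) ∨
    (∃ st' ivs, pvA_loop chunks st = some st' ∧ pvB_collect chunks acc = some ivs ∧
      st'.Nodup ∧ (∀ x, x ∈ st' ↔ pvCover ivs x) ∧ (∀ p ∈ ivs, p.1 ≤ p.2)) := by
  intro chunks
  induction chunks with
  | nil =>
    intro st acc hnd hmem hval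
    exact .inr ⟨st, acc, rfl, rfl, hnd, hmem, hval⟩
  | cons chunk rest ih =>
    intro st acc hnd hmem hval
    by_cases hp : PySem.Str.strip chunk = ""
    · left
      simp [pvA_loop, pvB_collect, pvB_chunkInterval, hp]
    · by_cases hin : PySem.Chars.isIn ['-'] (PySem.Chars.strip chunk.toList) = true
      · cases hsp : (PySem.Str.splitMax? (PySem.Str.strip chunk) "-" 1).getD [] with
        | nil => left; simp [pvA_loop, pvB_collect, pvB_chunkInterval, hp, hin, hsp]
        | cons a t =>
          cases t with
          | nil => left; simp [pvA_loop, pvB_collect, pvB_chunkInterval, hp, hin, hsp]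
          | cons b t2 =>
            cases t2 with
            | cons c t3 => left; simp [pvA_loop, pvB_collect, pvB_chunkInterval, hp, hin, hsp]
            | nil =>
              by_cases hd : (PySem.Chars.strIsdigit a.toList = false ∨ PySem.Chars.strIsdigit b.toList = false)
              · left; simp [pvA_loop, pvB_collect, pvB_chunkInterval, hp, hin, hsp, hd]
              · by_cases hb : (((PySem.Int.ofStr? a).getD 0 ≤ 0 ∨ (PySem.Int.ofStr? b).getD 0 ≤ 0) ∨
                    (PySem.Int.ofStr? b).getD 0 < (PySem.Int.ofStr? a).getD 0)
                · left; simp [pvA_loop, pvB_collect, pvB_chunkInterval, hp, hin, hsp, hd, hb]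
                · have hble : (PySem.Int.ofStr? a).getD 0 ≤ (PySem.Int.ofStr? b).getD 0 := by
                    omega
                  have hupd : (PySem.List.pyRange ((PySem.Int.ofStr? a).getD 0)
                        ((PySem.Int.ofStr? b).getD 0 + 1) 1).foldl PySem.Set.add st =
                      PySem.Set.update st (PySem.List.pyRange ((PySem.Int.ofStr? a).getD 0)
                        ((PySem.Int.ofStr? b).getD 0 + 1) 1) := rfl
                  have hnd' : ((PySem.List.pyRange ((PySem.Int.ofStr? a).getD 0)
                      ((PySem.Int.ofStr? b).getD 0 + 1) 1).foldl PySem.Set.add st).Nodup := by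
                    rw [hupd]; exact PySem.Set.nodup_update _ _ hnd
                  have hmem' : ∀ x, x ∈ (PySem.List.pyRange ((PySem.Int.ofStr? a).getD 0)
                      ((PySem.Int.ofStr? b).getD 0 + 1) 1).foldl PySem.Set.add st ↔
                      pvCover (acc ++ [((PySem.Int.ofStr? a).getD 0, (PySem.Int.ofStr? b).getD 0)]) x := by
                    intro x
                    rw [hupd, PySem.Set.mem_update, hmem x, pvCover_append_singleton,
                      PySem.List.mem_pyRange_one]
                    constructor
                    · rintro (h | h)
                      · exact .inl h
                      · exact .inr ⟨h.1, by omega⟩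
                    · rintro (h | h)
                      · exact .inl h
                      · exact .inr ⟨h.1, by omega⟩
                  have hval' : ∀ p ∈ acc ++ [((PySem.Int.ofStr? a).getD 0, (PySem.Int.ofStr? b).getD 0)],
                      p.1 ≤ p.2 := by
                    intro p hpm
                    rcases List.mem_append.mp hpm with h | h
                    · exact hval p h
                    · rw [List.mem_singleton] at h; subst h; exact hble
                  have := ih _ _ hnd' hmem' hval'
                  simpa [pvA_loop, pvB_collect, pvB_chunkInterval, hp, hin, hsp, hd, hb] using this
      · by_cases hd : (PySem.Chars.strIsdigit (PySem.Chars.strip chunk.toList) = false)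
        · left; simp [pvA_loop, pvB_collect, pvB_chunkInterval, hp, hin, hd]
        · by_cases hb : ((PySem.Int.ofStr? (PySem.Str.strip chunk)).getD 0 ≤ 0)
          · left; simp [pvA_loop, pvB_collect, pvB_chunkInterval, hp, hin, hd, hb]
          · have hnd' : (PySem.Set.add st ((PySem.Int.ofStr? (PySem.Str.strip chunk)).getD 0)).Nodup :=
              PySem.Set.nodup_add _ _ hnd
            have hmem' : ∀ x, x ∈ PySem.Set.add st ((PySem.Int.ofStr? (PySem.Str.strip chunk)).getD 0) ↔
                pvCover (acc ++ [((PySem.Int.ofStr? (PySem.Str.strip chunk)).getD 0,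
                  (PySem.Int.ofStr? (PySem.Str.strip chunk)).getD 0)]) x := by
              intro x
              rw [PySem.Set.mem_add, hmem x, pvCover_append_singleton]
              constructor
              · rintro (h | h)
                · exact .inl h
                · exact .inr ⟨by omega, by omega⟩
              · rintro (h | h)
                · exact .inl h
                · exact .inr (by omega)
            have hval' : ∀ p ∈ acc ++ [((PySem.Int.ofStr? (PySem.Str.strip chunk)).getD 0,
                (PySem.Int.ofStr? (PySem.Str.strip chunk)).getD 0)], p.1 ≤ p.2 := by
              intro p hpm
              rcases List.mem_append.mp hpm with h | h
              · exact hval p h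
              · rw [List.mem_singleton] at h; subst h; exact le_refl _
            have := ih _ _ hnd' hmem' hval'
            simpa [pvA_loop, pvB_collect, pvB_chunkInterval, hp, hin, hd, hb] using this

-- ===== VERDICT (by name: the statement is the Claim_ definition above) =====
theorem parse_field_spec_py_spec : Claim_equal_parse_field_spec_py := by
  intro spec _
  unfold Spec_parse_field_spec_py
  rcases pvParse_rel ((PySem.Str.split? spec ",").getD []) PySem.Set.empty []
      List.Pairwise.nil (by intro x; simp [pvCover, PySem.Set.empty]) (by intro p hpm; simp at hpm) with
    ⟨h1, h2⟩ | ⟨st, ivs, h1, h2, hnd, hmem, hval⟩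
  · have h1' : pvA_loop ((PySem.Str.split? spec ",").getD []) [] = none := h1
    simp [parse_field_spec_py, parse_field_spec_py_alt, h1', h2]
  · unfold parse_field_spec_py parse_field_spec_py_alt
    rw [h1, h2]
    cases hs : PySem.List.sorted ivs (fun iv => iv.1) false with
    | nil =>
      have hivs : ivs = [] := by
        have := PySem.List.sorted_eq_nil_iff (xs := ivs) (key := fun iv => iv.1) (rev := false)
        rw [hs] at this; exact this.mp rfl
      have hst : st = [] := List.eq_nil_iff_forall_not_mem.mpr (fun x hx => by
        have h := (hmem x).mp hx
        rw [hivs] at h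
        rcases h with ⟨p, hpm, _⟩
        simp at hpm)
      subst hivs
      subst hst
      rfl
    | cons p rest =>
      obtain ⟨s0, e0⟩ := p
      have hpw := PySem.List.sorted_pairwise (xs := ivs) (key := fun iv => iv.1)
      rw [hs] at hpw
      rcases List.pairwise_cons.mp hpw with ⟨hhead, hpw'⟩
      have hmemsort : ∀ q, q ∈ ((s0, e0) :: rest : List (Int × Int)) ↔ q ∈ ivs := by
        intro q
        rw [← hs]
        exact PySem.List.mem_sorted _ _ _ _
      have hs0 := hval (s0, e0) ((hmemsort _).mp (List.mem_cons_self ..))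
      obtain ⟨hP, hM⟩ := pvMerge_spec rest s0 e0 []
        (fun q hq => ⟨hhead q hq, hval q ((hmemsort _).mp (List.mem_cons_of_mem _ hq))⟩)
        hpw' hs0 List.Pairwise.nil (by intro a ha; simp at ha)
      have heq : PySem.List.sorted st (fun x => x) false = pvB_merge rest s0 e0 [] := by
        apply PySem.List.sorted_eq_of_perm_of_pairwise_lt
        · rw [List.perm_ext_iff_of_nodup (hP.imp (fun h => ne_of_lt h)) hnd]
          intro x
          rw [hM x]
          simp only [List.mem_nil_iff, false_or]
          rw [← pvCover_cons, pvCover_congr hmemsort x, ← hmem x]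
        · exact hP
      show some (PySem.List.sorted st fun x => x) =
        (match PySem.List.sorted ivs fun iv => iv.1 with
          | [] => some []
          | (s0, e0) :: rest => some (pvB_merge rest s0 e0 []))
      rw [heq, hs]
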